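-- pv_equiv track=rewrite | github.com/Ag3497120/verantyx-v6 | synth_results/5d588b4d.py | transform
-- ===== SOURCE A (Python) =====
-- import math
--
-- def transform(grid):
--     H = len(grid)
--     W = len(grid[0])
--
--     # Find color and count of non-zero cells in first row
--     row0 = grid[0]
--     color = next(v for v in row0 if v != 0)
--     N = sum(1 for v in row0 if v != 0)
--
--     # Generate sequence: groups [1,2,...,N,...,2,1] each followed by 0
--     seq = []
--     groups = list(range(1, N+1)) + list(range(N-1, 0, -1))
--     for g in groups:
--         seq.extend([color] * g)
--         seq.append(0)
--
--     # Compute output height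
--     total = len(seq)
--     H_out = math.ceil(total / W)
--
--     # Pad with 0s
--     while len(seq) < H_out * W:
--         seq.append(0)
--
--     # Reshape into H_out x W
--     out = []
--     for r in range(H_out):
--         out.append(seq[r*W:(r+1)*W])
--
--     return out
-- ===== SOURCE B (Python) =====
-- def transform(grid):
--     row0 = grid[0]
--     W = len(row0)
--     color = next(v for v in row0 if v != 0)
--     N = sum(1 for v in row0 if v != 0)
--     total = N * N + 2 * N - 1          # len of pyramid sequence, in closed form
--     H_out = -(-total // W)             # ceil(total / W)
--     out = [[0] * W for _ in range(H_out)]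
--     idx = 0
--     for i in range(1, 2 * N):
--         for _ in range(N - abs(N - i)):      # group sizes 1..N..1
--             q, c = divmod(idx, W)
--             out[q][c] = color
--             idx += 1
--         idx += 1                       # the single 0 after each group stays preallocated
--     return out
-- ===== Notes on version B (the rewrite author's own statement) =====
-- stated objective: alternative
-- what changed: B computes total = N*N + 2*N - 1 and H_out = ceil(total/W) in closed form, preallocates an H_out x W grid of zeros and fills it in place by divmod flat-index writes while walking the pyramid group sizes, replacing A's build-1D-sequence / pad / row-slice pipeline.
import Mathlib
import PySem

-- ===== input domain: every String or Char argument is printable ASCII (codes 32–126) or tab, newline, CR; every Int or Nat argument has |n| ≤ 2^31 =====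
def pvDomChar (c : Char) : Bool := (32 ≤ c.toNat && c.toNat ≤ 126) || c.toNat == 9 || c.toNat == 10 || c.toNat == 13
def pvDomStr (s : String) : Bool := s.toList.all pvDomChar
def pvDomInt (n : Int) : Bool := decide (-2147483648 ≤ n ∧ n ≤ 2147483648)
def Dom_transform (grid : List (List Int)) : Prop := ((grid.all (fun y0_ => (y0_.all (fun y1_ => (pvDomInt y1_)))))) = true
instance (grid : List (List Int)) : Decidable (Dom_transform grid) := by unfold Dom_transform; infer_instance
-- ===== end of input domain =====

-- B replaces A's build-sequence / pad / row-slice pipeline by a closed-form total with ceiling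
-- division and an in-place divmod fill of a preallocated H_out×W zero grid (alternative
-- decomposition, similar cost).

-- ===== PORT A =====
-- while len(seq) < H_out * W: seq.append(0)
def pvPad (seq : List Int) (target : Int) : List Int :=
  if (seq.length : Int) < target then pvPad (seq ++ [0]) target else seq
termination_by (target - seq.length).toNat
decreasing_by simp [List.length_append]; omega

def transform (grid : List (List Int)) : List (List Int) :=
  let row0 := grid.headD []                                    -- grid[0]; IndexError on [] is excluded by Pre_
  let W : Int := row0.length
  let color : Int := (row0.find? (fun v => v != 0)).getD 0     -- next(v for v in row0 if v != 0); StopIteration excluded by Pre_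
  let N : Int := row0.countP (fun v => v != 0)
  let groups := PySem.List.pyRange 1 (N+1) 1 ++ PySem.List.pyRange (N-1) 0 (-1)
  let seq := groups.foldl (fun s g => (s ++ List.replicate g.toNat color) ++ [0]) []  -- [color]*g; every g here is ≥ 1, so toNat is exact
  let total : Int := seq.length
  let H_out : Int := -(PySem.Int.floordiv (-total) W)          -- math.ceil(total/W) on two ints: exact integer ceiling; W = 0 (ZeroDivisionError) excluded by Pre_
  let seq2 := pvPad seq (H_out * W)
  (PySem.List.pyRange 0 H_out 1).foldl
    (fun out r => out ++ [PySem.List.slice seq2 (some (r*W)) (some ((r+1)*W))]) []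

-- ===== PORT B =====
-- inner 'for _ in range(g): q, c = divmod(idx, W); out[q][c] = color; idx += 1'
-- (whenever this loop runs in B, 0 ≤ idx < H_out*W, so q and c are in-bounds non-negative
-- indices and List.modify/List.set are exactly Python's in-place element assignment)
def pvFillGroup (W color : Int) : Nat → List (List Int) × Int → List (List Int) × Int
  | 0, st => st
  | Nat.succ g, st =>
      let q := PySem.Int.floordiv st.2 W
      let c := PySem.Int.mod st.2 W
      pvFillGroup W color g (st.1.modify q.toNat (fun row => row.set c.toNat color), st.2 + 1)

def transform_alt (grid : List (List Int)) : List (List Int) :=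
  let row0 := grid.headD []
  let W : Int := row0.length
  let color : Int := (row0.find? (fun v => v != 0)).getD 0
  let N : Int := row0.countP (fun v => v != 0)
  let total : Int := N * N + 2 * N - 1
  let H_out : Int := -(PySem.Int.floordiv (-total) W)
  let out0 := List.replicate H_out.toNat (List.replicate W.toNat (0:Int))
  ((PySem.List.pyRange 1 (2*N) 1).foldl
    (fun st i =>
      let st' := pvFillGroup W color (N - ((N - i).natAbs : Int)).toNat st
      (st'.1, st'.2 + 1))
    (out0, (0:Int))).1

-- ===== PRECONDITION & SPEC =====
-- Pre_ excludes exactly the inputs on which the Python A raises: the empty grid (IndexError on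
-- grid[0]) and grids whose first row has no non-zero entry (StopIteration from next;
-- this also covers an empty first row, where W = 0 would raise ZeroDivisionError).
def Pre_transform (grid : List (List Int)) : Prop :=
  grid ≠ [] ∧ ∃ v ∈ grid.headD [], v ≠ 0
instance (grid : List (List Int)) : Decidable (Pre_transform grid) := by
  unfold Pre_transform; infer_instance

def pvWitness_transform : List (List Int) := [[1]]

def Spec_transform (grid : List (List Int)) (out : List (List Int)) : Prop := out = transform_alt grid
instance (grid : List (List Int)) (out : List (List Int)) : Decidable (Spec_transform grid out) := by unfold Spec_transform; infer_instance

-- ===== CLAIM (what is proved, stated in full; the proofs are below) =====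
def Claim_equal_transform : Prop := ∀ (grid : List (List Int)), Dom_transform grid → Pre_transform grid → Spec_transform grid (transform grid)

-- ===== LEMMAS AND PROOFS =====

-- row-major chunking of a flat list: the common shape both ports are reduced to
def pvChunk (w h : Nat) (l : List Int) : List (List Int) :=
  (List.range h).map (fun r => (l.drop (r*w)).take w)

-- flat version of B's inner write loop
def pvSetRun (color : Int) : List Int → Nat → Nat → List Int
  | l, _, 0 => l
  | l, m, Nat.succ g => pvSetRun color (l.set m color) (m+1) g

theorem pvPad_eq_aux (k : Nat) : ∀ (seq : List Int) (target : Int),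
    (target - seq.length).toNat = k →
    pvPad seq target = seq ++ List.replicate k 0 := by
  induction k with
  | zero =>
    intro seq t h
    rw [pvPad, if_neg (by omega)]
    simp
  | succ n ih =>
    intro seq t h
    rw [pvPad, if_pos (by omega)]
    rw [ih (seq ++ [0]) t (by simp; omega)]
    simp [List.replicate_succ]

theorem pvPad_eq (seq : List Int) (target : Int) :
    pvPad seq target = seq ++ List.replicate (target - seq.length).toNat 0 :=
  pvPad_eq_aux _ seq target rfl

theorem foldSeq_length (color : Int) (gs : List Int) : ∀ (pre : List Int),
    (gs.foldl (fun s g => (s ++ List.replicate g.toNat color) ++ [0]) pre).length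
      = pre.length + (gs.map (fun g => g.toNat + 1)).sum := by
  induction gs with
  | nil => intro pre; simp
  | cons g gs ih =>
    intro pre
    simp only [List.foldl_cons, List.map_cons, List.sum_cons, ih]
    simp [List.length_append]
    omega

theorem groups_weight : ∀ (n : Nat), 1 ≤ n →
    ((((PySem.List.pyRange 1 ((n:Int)+1) 1 ++ PySem.List.pyRange ((n:Int)-1) 0 (-1)).map
        (fun g => g.toNat + 1)).sum : Nat) : Int) = (n:Int)*(n:Int) + 2*(n:Int) - 1 := by
  intro n hn
  induction n with
  | zero => omega
  | succ m ih =>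
    by_cases hm : 1 ≤ m
    · have h1 : ((m+1:Nat):Int) + 1 = ((m:Int) + 1) + 1 := by push_cast; ring
      rw [h1, PySem.List.pyRange_one_succ_right (by omega)]
      have h2 : ((m+1:Nat):Int) - 1 = (m:Int) := by push_cast; ring
      rw [h2, PySem.List.pyRange_neg_one_cons (by exact_mod_cast hm)]
      specialize ih hm
      simp only [List.map_append, List.sum_append] at ih ⊢
      simp only [List.map_cons, List.sum_cons, List.map_nil, List.sum_nil] at ⊢
      generalize hS1 : (List.map (fun g => g.toNat+1) (PySem.List.pyRange 1 ((m:Int)+1))).sum = S1 at ih ⊢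
      generalize hS2 : (List.map (fun g => g.toNat+1) (PySem.List.pyRange ((m:Int)-1) 0 (-1))).sum = S2 at ih ⊢
      have hsq : ((m:Int)+1)*((m:Int)+1) = (m:Int)*(m:Int) + 2*(m:Int) + 1 := by ring
      push_cast
      rw [hsq]; omega
    · have hm0 : m = 0 := by omega
      subst hm0
      decide

theorem flatMap_single {α β : Type} (g : α → β) : ∀ (L : List α),
    L.flatMap (fun k => [g k]) = L.map g := by
  intro L; induction L with
  | nil => rfl
  | cons x xs ih => simp [ih]

theorem idx_eq_iff (w r c m : Nat) (hw : 0 < w) (hc : c < w) :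
    m = r*w + c ↔ m/w = r ∧ m%w = c := by
  constructor
  · intro he
    subst he
    constructor
    · rw [Nat.add_comm, Nat.add_mul_div_right c r hw, Nat.div_eq_of_lt hc]
      omega
    · simp [Nat.mod_eq_of_lt hc]
  · rintro ⟨h1, h2⟩
    have h0 := Nat.div_add_mod m w
    calc m = w * (m/w) + m % w := h0.symm
    _ = r*w + c := by rw [h1, h2, Nat.mul_comm]

theorem reshape_eq (l : List Int) (h w : Nat) :
    (PySem.List.pyRange 0 ((h:Nat):Int) 1).foldl
      (fun out r => out ++ [PySem.List.slice l (some (r*((w:Nat):Int))) (some ((r+1)*((w:Nat):Int)))]) []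
      = pvChunk w h l := by
  rw [PySem.List.foldl_append_eq_flatMap
    (fun r => [PySem.List.slice l (some (r*((w:Nat):Int))) (some ((r+1)*((w:Nat):Int)))])]
  rw [PySem.List.pyRange_zero_natCast]
  rw [List.flatMap_map]
  simp only [List.nil_append]
  rw [flatMap_single (fun k : Nat => PySem.List.slice l (some ((k:Int)*(w:Int))) (some (((k:Int)+1)*(w:Int))))]
  unfold pvChunk
  apply List.map_congr_left
  intro k _
  have h1 : (k:Int)*(w:Int) = ((k*w : Nat) : Int) := by push_cast; ring
  have h2 : ((k:Int)+1)*(w:Int) = ((k*w : Nat) : Int) + ((w:Nat):Int) := by push_cast; ring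
  rw [h1, h2, PySem.List.slice_natCast_add]

theorem chunk_modify (w h : Nat) (color : Int) (l : List Int) (m : Nat) (hw : 0 < w)
    (hm : m < h*w) (hl : l.length = h*w) :
    (pvChunk w h l).modify (m / w) (fun row => row.set (m % w) color)
      = pvChunk w h (l.set m color) := by
  have hrw : ∀ r : Nat, r < h → r * w + w ≤ h * w := by
    intro r hr
    calc r*w + w = (r+1)*w := by ring
    _ ≤ h*w := Nat.mul_le_mul_right _ (by omega)
  apply List.ext_getElem
  · simp [pvChunk, List.length_modify]
  intro r hr1 hr2
  have hrh : r < h := by simpa [pvChunk, List.length_modify] using hr1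
  rw [List.getElem_modify]
  simp only [pvChunk, List.getElem_map, List.getElem_range]
  by_cases hreq : m / w = r
  · rw [if_pos hreq]
    apply List.ext_getElem
    · simp [hl]
    intro c hc1 hc2
    have hcw : c < w := by
      simp only [List.length_set, List.length_take, List.length_drop, hl] at hc1
      omega
    rw [List.getElem_set]
    rw [List.getElem_take, List.getElem_drop]
    rw [List.getElem_take, List.getElem_drop, List.getElem_set]
    split_ifs with hA hB hB
    · rfl
    · exact absurd ((idx_eq_iff w r c m hw hcw).mpr ⟨hreq, hA⟩) hB
    · exact absurd ((idx_eq_iff w r c m hw hcw).mp hB).2 hA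
    · rfl
  · rw [if_neg hreq]
    apply List.ext_getElem
    · simp
    intro c hc1 hc2
    have hcw : c < w := by
      simp only [List.length_take, List.length_drop, hl] at hc1
      omega
    rw [List.getElem_take, List.getElem_drop]
    rw [List.getElem_take, List.getElem_drop, List.getElem_set]
    rw [if_neg (fun heq => hreq ((idx_eq_iff w r c m hw hcw).mp heq).1)]

theorem fill_eq (w h : Nat) (color : Int) (hw : 0 < w) :
    ∀ (g : Nat) (l : List Int) (m : Nat), l.length = h*w → m + g ≤ h*w →
    pvFillGroup ((w:Nat):Int) color g (pvChunk w h l, ((m:Nat):Int))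
      = (pvChunk w h (pvSetRun color l m g), (((m+g : Nat)):Int)) := by
  intro g
  induction g with
  | zero => intro l m _ _; simp [pvFillGroup, pvSetRun]
  | succ g ih =>
    intro l m hl hb
    rw [pvFillGroup]
    simp only [PySem.Int.floordiv_natCast, PySem.Int.mod_natCast, Int.toNat_natCast]
    have hms : ((m:Int) + 1) = ((m+1 : Nat) : Int) := by push_cast; ring
    rw [hms, chunk_modify w h color l m hw (by omega) hl]
    rw [ih (l.set m color) (m+1) (by simp [hl]) (by omega)]
    rw [pvSetRun]
    congr 1
    omega

theorem setRun_zeros (color : Int) : ∀ (g : Nat) (pre : List Int) (k : Nat), g ≤ k →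
    pvSetRun color (pre ++ List.replicate k 0) pre.length g
      = (pre ++ List.replicate g color) ++ List.replicate (k - g) 0 := by
  intro g
  induction g with
  | zero => intro pre k _; simp [pvSetRun]
  | succ g ih =>
    intro pre k hk
    obtain ⟨k', rfl⟩ : ∃ k', k = k' + 1 := ⟨k - 1, by omega⟩
    rw [pvSetRun]
    have hset : (pre ++ List.replicate (k'+1) 0).set pre.length color
        = (pre ++ [color]) ++ List.replicate k' 0 := by
      rw [List.set_append, if_neg (by omega)]
      simp [List.replicate_succ]
    rw [hset]
    have hlen : pre.length + 1 = (pre ++ [color]).length := by simp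
    rw [hlen, ih (pre ++ [color]) k' (by omega)]
    simp [List.replicate_succ, List.append_assoc]

theorem chunk_replicate (w h : Nat) :
    List.replicate h (List.replicate w (0:Int)) = pvChunk w h (List.replicate (h*w) 0) := by
  apply List.ext_getElem
  · simp [pvChunk]
  intro r h1 h2
  simp only [pvChunk, List.getElem_map, List.getElem_range, List.getElem_replicate]
  rw [List.drop_replicate, List.take_replicate]
  congr 1
  simp at h1
  have : r * w + w ≤ h * w := by
    calc r*w + w = (r+1)*w := by ring
    _ ≤ h*w := Nat.mul_le_mul_right _ (by omega)
  omega

theorem groups_map (N : Int) (hN : 1 ≤ N) :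
    (PySem.List.pyRange 1 (2*N) 1).map (fun i => N - (((N - i).natAbs : Nat) : Int))
      = PySem.List.pyRange 1 (N+1) 1 ++ PySem.List.pyRange (N-1) 0 (-1) := by
  apply List.ext_getElem
  · simp [PySem.List.length_pyRange_one, PySem.List.pyRange_neg_one]
    omega
  intro k h1 h2
  have hk : k < (2*N - 1).toNat := by
    simpa [PySem.List.length_pyRange_one] using h1
  rw [List.getElem_map, PySem.List.getElem_pyRange_one]
  by_cases hkN : k < N.toNat
  · rw [List.getElem_append_left (by simp [PySem.List.length_pyRange_one]; omega)]
    rw [PySem.List.getElem_pyRange_one]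
    omega
  · rw [List.getElem_append_right (by simp [PySem.List.length_pyRange_one]; omega)]
    simp only [PySem.List.pyRange_neg_one, List.getElem_map, List.getElem_range,
      PySem.List.length_pyRange_one]
    omega

theorem outer (w h : Nat) (color : Int) (hw : 0 < w) :
    ∀ (gs : List Int) (pre : List Int),
    pre.length + (gs.map (fun g => g.toNat + 1)).sum ≤ h*w →
    gs.foldl (fun st g =>
        let st' := pvFillGroup ((w:Nat):Int) color g.toNat st
        (st'.1, st'.2 + 1))
      (pvChunk w h (pre ++ List.replicate (h*w - pre.length) 0), ((pre.length : Nat):Int))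
    = (pvChunk w h ((gs.foldl (fun s g => (s ++ List.replicate g.toNat color) ++ [0]) pre)
          ++ List.replicate (h*w - (gs.foldl (fun s g => (s ++ List.replicate g.toNat color) ++ [0]) pre).length) 0),
       (((gs.foldl (fun s g => (s ++ List.replicate g.toNat color) ++ [0]) pre).length : Nat):Int)) := by
  intro gs
  induction gs with
  | nil => intro pre _; simp
  | cons g gs ih =>
    intro pre hb
    simp only [List.map_cons, List.sum_cons] at hb
    simp only [List.foldl_cons]
    have hplen : pre.length ≤ h*w := by omega
    have hlenl : (pre ++ List.replicate (h*w - pre.length) (0:Int)).length = h*w := by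
      simp; omega
    rw [fill_eq w h color hw g.toNat _ pre.length hlenl (by omega)]
    rw [setRun_zeros color g.toNat pre (h*w - pre.length) (by omega)]
    set pre' := (pre ++ List.replicate g.toNat color) ++ [0] with hpre'
    have hplen' : pre'.length = pre.length + g.toNat + 1 := by simp [hpre']; omega
    have hflat : (pre ++ List.replicate g.toNat color) ++ List.replicate (h*w - pre.length - g.toNat) 0
        = pre' ++ List.replicate (h*w - pre'.length) 0 := by
      have hrep : List.replicate (h*w - pre.length - g.toNat) (0:Int)
          = 0 :: List.replicate (h*w - pre'.length) 0 := by
        have : h*w - pre.length - g.toNat = (h*w - pre'.length) + 1 := by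
          rw [hplen']; omega
        rw [this, List.replicate_succ]
      rw [hrep, hpre']
      simp
    rw [hflat]
    have hidx : ((pre.length + g.toNat : Nat) : Int) + 1 = ((pre'.length : Nat) : Int) := by
      rw [hplen']; push_cast; ring
    rw [hidx]
    exact ih pre' (by rw [hplen']; omega)

theorem core (color : Int) (n w : Nat) (hn : 1 ≤ n) (hw : 1 ≤ w) :
    (let N : Int := (n:Nat)
     let W : Int := (w:Nat)
     let groups := PySem.List.pyRange 1 (N+1) 1 ++ PySem.List.pyRange (N-1) 0 (-1)
     let seq := groups.foldl (fun s g => (s ++ List.replicate g.toNat color) ++ [0]) []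
     let total : Int := seq.length
     let H_out : Int := -(PySem.Int.floordiv (-total) W)
     let seq2 := pvPad seq (H_out * W)
     (PySem.List.pyRange 0 H_out 1).foldl
       (fun out r => out ++ [PySem.List.slice seq2 (some (r*W)) (some ((r+1)*W))]) [])
    = (let N : Int := (n:Nat)
       let W : Int := (w:Nat)
       let total : Int := N * N + 2 * N - 1
       let H_out : Int := -(PySem.Int.floordiv (-total) W)
       let out0 := List.replicate H_out.toNat (List.replicate W.toNat (0:Int))
       ((PySem.List.pyRange 1 (2*N) 1).foldl
         (fun st i =>
           let st' := pvFillGroup W color (N - (((N - i).natAbs : Nat) : Int)).toNat st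
           (st'.1, st'.2 + 1))
         (out0, (0:Int))).1) := by
  dsimp only
  set groups := PySem.List.pyRange 1 ((n:Int)+1) 1 ++ PySem.List.pyRange ((n:Int)-1) 0 (-1) with hgroups
  set seq := groups.foldl (fun s g => (s ++ List.replicate g.toNat color) ++ [0]) [] with hseq
  have hwpos : (0:Int) < (w:Int) := by exact_mod_cast hw
  have hnpos : (1:Int) ≤ (n:Int) := by exact_mod_cast hn
  -- the closed-form total
  have hws : ((( groups.map (fun g => g.toNat + 1)).sum : Nat) : Int)
      = (n:Int)*(n:Int) + 2*(n:Int) - 1 := groups_weight n hn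
  have hlen : ((seq.length : Nat) : Int) = (n:Int)*(n:Int) + 2*(n:Int) - 1 := by
    rw [hseq, foldSeq_length]
    simpa using hws
  rw [hlen]
  set T : Int := (n:Int)*(n:Int) + 2*(n:Int) - 1 with hT
  have hT2 : 2 ≤ T := by rw [hT]; nlinarith
  set H : Int := -(PySem.Int.floordiv (-T) (w:Int)) with hH
  have hbr : (H - 1) * (w:Int) < T ∧ T ≤ H * (w:Int) :=
    (PySem.Int.neg_floordiv_neg_eq_iff_of_pos hwpos).mp rfl
  have hH0 : 0 ≤ H := by
    by_contra hc
    push Not at hc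
    have : H * (w:Int) ≤ 0 := mul_nonpos_of_nonpos_of_nonneg (by omega) (by omega)
    omega
  have hcast : H = ((H.toNat : Nat) : Int) := (Int.toNat_of_nonneg hH0).symm
  set hh : Nat := H.toNat with hhh
  have hHW : H * (w:Int) = ((hh*w : Nat) : Int) := by rw [hcast]; push_cast; ring
  have hlenT : seq.length = T.toNat := by omega
  have htot_le : T ≤ ((hh*w : Nat) : Int) := by rw [← hHW]; exact hbr.2
  -- A side
  rw [pvPad_eq seq (H * (w:Int))]
  have hpadn : (H * (w:Int) - (seq.length:Int)).toNat = hh*w - seq.length := by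
    rw [hHW]; omega
  rw [hpadn, hcast, reshape_eq]
  -- B side
  have hout0 : List.replicate H.toNat (List.replicate ((w:Int)).toNat (0:Int))
      = pvChunk w hh (List.replicate (hh*w) 0) := by
    rw [Int.toNat_natCast]
    exact chunk_replicate w hh
  rw [hout0]
  have hfold := List.foldl_map
    (f := fun i : Int => (n:Int) - ((((n:Int) - i).natAbs : Nat):Int))
    (g := fun st (g:Int) =>
        let st' := pvFillGroup ((w:Nat):Int) color g.toNat st
        (st'.1, st'.2 + 1))
    (l := PySem.List.pyRange 1 (2*(n:Int)) 1)
    (init := (pvChunk w hh (List.replicate (hh*w) 0), (0:Int)))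
  have hstep : (PySem.List.pyRange 1 (2*(n:Int)) 1).foldl
      (fun st i =>
        let st' := pvFillGroup ((w:Nat):Int) color (((n:Int) - ((((n:Int) - i).natAbs : Nat):Int)).toNat) st
        (st'.1, st'.2 + 1))
      (pvChunk w hh (List.replicate (hh*w) 0), (0:Int))
      = ((PySem.List.pyRange 1 (2*(n:Int)) 1).map
          (fun i : Int => (n:Int) - ((((n:Int) - i).natAbs : Nat):Int))).foldl
        (fun st (g:Int) =>
          let st' := pvFillGroup ((w:Nat):Int) color g.toNat st
          (st'.1, st'.2 + 1))
        (pvChunk w hh (List.replicate (hh*w) 0), (0:Int)) := hfold.symm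
  rw [hstep, groups_map (n:Int) hnpos, ← hgroups]
  have houter := outer w hh color (by omega) groups [] (by simp only [List.length_nil, Nat.zero_add]; omega)
  simp only [List.length_nil, Nat.cast_zero, List.nil_append, Nat.sub_zero] at houter
  rw [houter, ← hseq]

-- ===== VERDICT (by name: the statement is the Claim_ definition above) =====
theorem transform_spec : Claim_equal_transform := by
  intro grid _ hPre
  obtain ⟨hne, v, hv, hv0⟩ := hPre
  unfold Spec_transform transform transform_alt
  have hw : 1 ≤ (grid.headD []).length := List.length_pos_of_mem hv
  have hn : 1 ≤ (grid.headD []).countP (fun v => v != 0) :=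
    List.countP_pos_iff.mpr ⟨v, hv, by simp [hv0]⟩
  exact core ((grid.headD []).find? (fun v => v != 0) |>.getD 0) _ _ hn hw
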